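-- pv_equiv track=rewrite | github.com/anbinumer/acevalidation-handoff | auth/azure_ad_module_original.py | _determine_user_role
-- ===== SOURCE A (Python) =====
-- def _determine_user_role(user_data):
--     """Determine user role for RTO context based on job title or department"""
--     job_title = (user_data.get('jobTitle') or '').lower()
--     department = (user_data.get('department') or '').lower()
--
--     # RTO-specific role mapping
--     if any(keyword in job_title for keyword in ['trainer', 'assessor', 'teacher', 'educator']):
--         return 'Assessor'
--     elif any(keyword in job_title for keyword in ['manager', 'director', 'head', 'lead']):
--         return 'Manager'
--     elif any(keyword in job_title for keyword in ['compliance', 'quality', 'audit']):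
--         return 'Compliance Officer'
--     elif any(keyword in department for keyword in ['training', 'education', 'vet']):
--         return 'Training Staff'
--     else:
--         return 'Validator'  # Default role
-- ===== SOURCE B (Python) =====
-- def _determine_user_role(user_data):
--     """Collect ALL matching roles via a keyword->role map, then pick the highest-priority one."""
--     job_title = (user_data.get('jobTitle') or '').lower()
--     department = (user_data.get('department') or '').lower()
--     keyword_role = {
--         'trainer': 'Assessor', 'assessor': 'Assessor',
--         'teacher': 'Assessor', 'educator': 'Assessor',
--         'manager': 'Manager', 'director': 'Manager',
--         'head': 'Manager', 'lead': 'Manager',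
--         'compliance': 'Compliance Officer', 'quality': 'Compliance Officer',
--         'audit': 'Compliance Officer',
--         'training': 'Training Staff', 'education': 'Training Staff',
--         'vet': 'Training Staff',
--     }
--     matched = {role for kw, role in keyword_role.items()
--                if kw in (department if role == 'Training Staff' else job_title)}
--     for role in ('Assessor', 'Manager', 'Compliance Officer', 'Training Staff'):
--         if role in matched:
--             return role
--     return 'Validator'
-- ===== Notes on version B (the rewrite author's own statement) =====
-- stated objective: alternative
-- what changed: Instead of a short-circuiting if/elif cascade, B builds a keyword->role map, collects the set of ALL roles whose keywords match (a set comprehension), and then selects the highest-priority matched role from a priority list.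
import Mathlib
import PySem

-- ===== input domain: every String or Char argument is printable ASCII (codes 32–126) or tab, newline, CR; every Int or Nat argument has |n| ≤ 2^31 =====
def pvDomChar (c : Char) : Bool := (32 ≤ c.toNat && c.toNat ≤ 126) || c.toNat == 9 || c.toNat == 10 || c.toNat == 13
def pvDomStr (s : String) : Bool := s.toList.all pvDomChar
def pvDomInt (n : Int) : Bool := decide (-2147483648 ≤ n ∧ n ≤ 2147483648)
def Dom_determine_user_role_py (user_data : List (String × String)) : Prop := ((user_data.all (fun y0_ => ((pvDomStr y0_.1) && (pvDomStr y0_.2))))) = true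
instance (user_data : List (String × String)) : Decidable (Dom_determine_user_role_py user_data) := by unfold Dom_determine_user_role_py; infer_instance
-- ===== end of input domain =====

-- B collects ALL matching roles into a set via a keyword→role map, then picks the highest-priority one; alternative decomposition (collect-then-select instead of short-circuiting branch cascade), same cost.
-- ===== PORT A =====
def determine_user_role_py (user_data : List (String × String)) : String :=
  let d := PySem.Dict.mk user_data
  let job_title := PySem.Str.lower ((d.get? "jobTitle").getD "")
  let department := PySem.Str.lower ((d.get? "department").getD "")
  if ["trainer", "assessor", "teacher", "educator"].any (fun k => PySem.Str.isIn k job_title) then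
    "Assessor"
  else if ["manager", "director", "head", "lead"].any (fun k => PySem.Str.isIn k job_title) then
    "Manager"
  else if ["compliance", "quality", "audit"].any (fun k => PySem.Str.isIn k job_title) then
    "Compliance Officer"
  else if ["training", "education", "vet"].any (fun k => PySem.Str.isIn k department) then
    "Training Staff"
  else
    "Validator"

-- ===== PORT B =====
-- the keyword_role dict of Source B (literal, no duplicate keys: kept as its items list)
def pvKeywordRole : List (String × String) :=
  [ ("trainer", "Assessor"), ("assessor", "Assessor"),
    ("teacher", "Assessor"), ("educator", "Assessor"),
    ("manager", "Manager"), ("director", "Manager"),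
    ("head", "Manager"), ("lead", "Manager"),
    ("compliance", "Compliance Officer"), ("quality", "Compliance Officer"),
    ("audit", "Compliance Officer"),
    ("training", "Training Staff"), ("education", "Training Staff"),
    ("vet", "Training Staff") ]

-- the 'for role in priority: if role in matched: return role' loop of Source B
def pvFirstInSet (matched : PySem.Set String) : List String → String
  | [] => "Validator"
  | r :: rest => if PySem.Set.contains matched r then r else pvFirstInSet matched rest

-- the set comprehension {role for kw, role in keyword_role.items() if kw in (…)}
def pvMatched (job_title department : String) : PySem.Set String :=
  PySem.Set.ofList ((pvKeywordRole.filter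
    (fun p => PySem.Str.isIn p.1 (if p.2 == "Training Staff" then department else job_title))).map Prod.snd)

def determine_user_role_py_alt (user_data : List (String × String)) : String :=
  let d := PySem.Dict.mk user_data
  let job_title := PySem.Str.lower ((d.get? "jobTitle").getD "")
  let department := PySem.Str.lower ((d.get? "department").getD "")
  pvFirstInSet (pvMatched job_title department) ["Assessor", "Manager", "Compliance Officer", "Training Staff"]

-- ===== PRECONDITION & SPEC =====
def Spec_determine_user_role_py (user_data : List (String × String)) (out : String) : Prop := out = determine_user_role_py_alt user_data
instance (user_data : List (String × String)) (out : String) : Decidable (Spec_determine_user_role_py user_data out) := by unfold Spec_determine_user_role_py; infer_instance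

-- ===== CLAIM (what is proved, stated in full; the proofs are below) =====
def Claim_equal_determine_user_role_py : Prop := ∀ (user_data : List (String × String)), Dom_determine_user_role_py user_data → Spec_determine_user_role_py user_data (determine_user_role_py user_data)

-- ===== LEMMAS AND PROOFS =====
lemma pv_contains (jt dep r : String) :
    PySem.Set.contains (pvMatched jt dep) r
      = pvKeywordRole.any (fun p => p.2 == r
          && PySem.Str.isIn p.1 (if p.2 == "Training Staff" then dep else jt)) := by
  rw [Bool.eq_iff_iff]
  simp only [pvMatched, PySem.Set.contains_iff, PySem.Set.mem_ofList, List.mem_map,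
    List.mem_filter, List.any_eq_true, Bool.and_eq_true, beq_iff_eq]
  constructor
  · rintro ⟨p, ⟨hp, hin⟩, hr⟩; exact ⟨p, hp, hr, hin⟩
  · rintro ⟨p, hp, hr, hin⟩; exact ⟨p, ⟨hp, hin⟩, hr⟩

lemma pv_contains_assessor (jt dep : String) :
    PySem.Set.contains (pvMatched jt dep) "Assessor"
      = (["trainer", "assessor", "teacher", "educator"].any (fun k => PySem.Str.isIn k jt)) := by
  rw [pv_contains]; rfl

lemma pv_contains_manager (jt dep : String) :
    PySem.Set.contains (pvMatched jt dep) "Manager"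
      = (["manager", "director", "head", "lead"].any (fun k => PySem.Str.isIn k jt)) := by
  rw [pv_contains]; rfl

lemma pv_contains_compliance (jt dep : String) :
    PySem.Set.contains (pvMatched jt dep) "Compliance Officer"
      = (["compliance", "quality", "audit"].any (fun k => PySem.Str.isIn k jt)) := by
  rw [pv_contains]; rfl

lemma pv_contains_training (jt dep : String) :
    PySem.Set.contains (pvMatched jt dep) "Training Staff"
      = (["training", "education", "vet"].any (fun k => PySem.Str.isIn k dep)) := by
  rw [pv_contains]; rfl

theorem pv_bodies_eq (jt dep : String) :
    (if ["trainer", "assessor", "teacher", "educator"].any (fun k => PySem.Str.isIn k jt) then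
      "Assessor"
    else if ["manager", "director", "head", "lead"].any (fun k => PySem.Str.isIn k jt) then
      "Manager"
    else if ["compliance", "quality", "audit"].any (fun k => PySem.Str.isIn k jt) then
      "Compliance Officer"
    else if ["training", "education", "vet"].any (fun k => PySem.Str.isIn k dep) then
      "Training Staff"
    else
      "Validator") =
    pvFirstInSet (pvMatched jt dep)
      ["Assessor", "Manager", "Compliance Officer", "Training Staff"] := by
  simp only [pvFirstInSet, pv_contains_assessor, pv_contains_manager,
    pv_contains_compliance, pv_contains_training]

-- ===== VERDICT (by name: the statement is the Claim_ definition above) =====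
theorem determine_user_role_py_spec : Claim_equal_determine_user_role_py := by
  intro user_data _
  unfold Spec_determine_user_role_py determine_user_role_py determine_user_role_py_alt
  exact pv_bodies_eq _ _
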